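-- pv_equiv track=rewrite | github.com/owencqueen/owencqueen.github.io | build.py | trim_news
-- ===== SOURCE A (Python) =====
-- from typing import Dict, List, Tuple, Optional
--
-- NEWS_LIMIT = 8
--
-- def trim_news(markdown_text: str, limit: int = NEWS_LIMIT) -> str:
--     lines = markdown_text.strip().splitlines()
--     kept: List[str] = []
--     count = 0
--
--     for line in lines:
--         stripped = line.strip()
--         is_bullet = stripped.startswith(("* ", "- "))
--         if is_bullet:
--             count += 1
--             if count > limit:
--                 continue
--         kept.append(line)
--
--     return "\n".join(kept)
-- ===== SOURCE B (Python) =====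
-- NEWS_LIMIT = 8
--
-- def trim_news(markdown_text: str, limit: int = NEWS_LIMIT) -> str:
--     lines = markdown_text.strip().splitlines()
--     bullet_idx = [i for i, line in enumerate(lines)
--                   if line.strip().startswith(("* ", "- "))]
--     drop = set(bullet_idx[max(limit, 0):])
--     return "\n".join(line for i, line in enumerate(lines) if i not in drop)
-- ===== Notes on version B (the rewrite author's own statement) =====
-- stated objective: alternative
-- what changed: Replaces the single pass with a running bullet counter by a two-pass index-table structure: one pass collects the indices of bullet lines, a drop-set is formed from the bullet indices at position max(limit,0) onward, and a second pass joins every line whose index is not in the drop-set.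
import Mathlib
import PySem

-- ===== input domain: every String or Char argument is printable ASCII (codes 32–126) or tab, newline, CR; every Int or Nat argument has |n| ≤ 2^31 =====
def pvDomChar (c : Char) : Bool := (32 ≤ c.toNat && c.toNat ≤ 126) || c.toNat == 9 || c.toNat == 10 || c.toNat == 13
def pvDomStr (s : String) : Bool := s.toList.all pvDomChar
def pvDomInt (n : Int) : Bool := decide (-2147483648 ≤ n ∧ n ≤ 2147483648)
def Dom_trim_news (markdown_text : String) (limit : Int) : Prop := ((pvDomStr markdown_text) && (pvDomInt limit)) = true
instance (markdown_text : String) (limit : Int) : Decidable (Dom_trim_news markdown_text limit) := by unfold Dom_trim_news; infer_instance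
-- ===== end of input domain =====

-- B replaces A's running-counter single pass by a bullet-index table plus drop-set filter (alternative decomposition, same cost).


-- ===== PORT A =====
def trim_news (markdown_text : String) (limit : Int) : String :=
  let lines := PySem.Str.splitlines (PySem.Str.strip markdown_text)
  let res := lines.foldl (fun (st : List String × Int) line =>
    let kept := st.1
    let count := st.2
    let stripped := PySem.Str.strip line
    let is_bullet := PySem.Str.startswith stripped "* " || PySem.Str.startswith stripped "- "
    if is_bullet then
      let count := count + 1
      if count > limit then (kept, count) else (kept ++ [line], count)
    else (kept ++ [line], count)) ([], 0)
  PySem.Str.join "\n" res.1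

-- ===== PORT B =====
-- the bullet test of Source B: line.strip().startswith(("* ", "- "))
def pvBullet (line : String) : Bool :=
  PySem.Str.startswith (PySem.Str.strip line) "* " || PySem.Str.startswith (PySem.Str.strip line) "- "

def trim_news_alt (markdown_text : String) (limit : Int) : String :=
  let lines := PySem.Str.splitlines (PySem.Str.strip markdown_text)
  let bulletIdx := ((PySem.List.enumerate lines 0).filter (fun q => pvBullet q.2)).map (·.1)
  let drop := PySem.Set.ofList (PySem.List.slice bulletIdx (some (max limit 0)) none)
  PySem.Str.join "\n"
    (((PySem.List.enumerate lines 0).filter (fun q => !(PySem.Set.contains drop q.1))).map (·.2))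

-- ===== PRECONDITION & SPEC =====
def Spec_trim_news (markdown_text : String) (limit : Int) (out : String) : Prop := out = trim_news_alt markdown_text limit
instance (markdown_text : String) (limit : Int) (out : String) : Decidable (Spec_trim_news markdown_text limit out) := by unfold Spec_trim_news; infer_instance

-- ===== CLAIM (what is proved, stated in full; the proofs are below) =====
def Claim_equal_trim_news : Prop := ∀ (markdown_text : String) (limit : Int), Dom_trim_news markdown_text limit → Spec_trim_news markdown_text limit (trim_news markdown_text limit)

-- ===== LEMMAS AND PROOFS =====

-- common reference recursion: keep non-bullets, keep the next m bullets
def pvGo : List String → Nat → List String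
  | [], _ => []
  | l :: ls, m =>
    if pvBullet l then
      match m with
      | 0 => pvGo ls 0
      | k + 1 => l :: pvGo ls k
    else l :: pvGo ls m

-- indices of bullet lines in enumerate ls n
def pvBIdx (ls : List String) (n : Int) : List Int :=
  ((PySem.List.enumerate ls n).filter (fun q => pvBullet q.2)).map (·.1)

lemma pvBIdx_nil (n : Int) : pvBIdx [] n = [] := by
  simp [pvBIdx, PySem.List.enumerate_nil]

lemma pvBIdx_cons (l : String) (ls : List String) (n : Int) :
    pvBIdx (l :: ls) n =
      if pvBullet l then n :: pvBIdx ls (n + 1) else pvBIdx ls (n + 1) := by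
  simp [pvBIdx, PySem.List.enumerate_cons, List.filter_cons]
  split <;> simp

lemma pvBIdx_ge (ls : List String) (n : Int) : ∀ x ∈ pvBIdx ls n, n ≤ x := by
  induction ls generalizing n with
  | nil => simp [pvBIdx_nil]
  | cons l ls ih =>
    intro x hx
    rw [pvBIdx_cons] at hx
    by_cases hb : pvBullet l
    · rw [if_pos hb] at hx
      rcases List.mem_cons.mp hx with h | h
      · omega
      · have := ih (n + 1) x h; omega
    · rw [if_neg hb] at hx
      have := ih (n + 1) x hx; omega

lemma pvMem_enumerate_fst_ge {α : Type} (ls : List α) (n : Int) (q : Int × α)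
    (h : q ∈ PySem.List.enumerate ls n) : n ≤ q.1 := by
  rw [PySem.List.mem_enumerate_iff] at h
  obtain ⟨k, hk, rfl⟩ := h
  simp

-- A's fold computes pvGo with remaining budget (limit - c).toNat
lemma pvA_fold (limit : Int) (ls : List String) (acc : List String) (c : Int) :
    (ls.foldl (fun (st : List String × Int) line =>
      let kept := st.1
      let count := st.2
      let stripped := PySem.Str.strip line
      let is_bullet := PySem.Str.startswith stripped "* " || PySem.Str.startswith stripped "- "
      if is_bullet then
        let count := count + 1
        if count > limit then (kept, count) else (kept ++ [line], count)
      else (kept ++ [line], count)) (acc, c)).1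
    = acc ++ pvGo ls (limit - c).toNat := by
  induction ls generalizing acc c with
  | nil => simp [pvGo]
  | cons l ls ih =>
    simp only [List.foldl_cons]
    by_cases hb : pvBullet l
    · have hb' : (PySem.Str.startswith (PySem.Str.strip l) "* "
          || PySem.Str.startswith (PySem.Str.strip l) "- ") = true := hb
      by_cases hgt : c + 1 > limit
      · have hm : (limit - c).toNat = 0 := by omega
        have hm' : (limit - (c + 1)).toNat = 0 := by omega
        simp only [hb', if_pos hgt, if_true]
        rw [ih acc (c + 1)]
        simp [pvGo, hb, hm, hm']
      · have hm : (limit - c).toNat = (limit - (c + 1)).toNat + 1 := by omega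
        simp only [hb', if_neg hgt, if_true]
        rw [ih (acc ++ [l]) (c + 1)]
        simp [pvGo, hb, hm]
    · have hb' : (PySem.Str.startswith (PySem.Str.strip l) "* "
          || PySem.Str.startswith (PySem.Str.strip l) "- ") = false := by
        simpa [pvBullet] using hb
      simp only [hb', Bool.false_eq_true, if_false]
      rw [ih (acc ++ [l]) c]
      simp [pvGo, hb]

lemma pvSet_contains_ofList (xs : List Int) (x : Int) :
    PySem.Set.contains (PySem.Set.ofList xs) x = xs.contains x := by
  simp

-- B's filter against the dropped bullet indices computes pvGo
lemma pvB_filter (ls : List String) (n : Int) (m : Nat) :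
    ((PySem.List.enumerate ls n).filter
        (fun q => !(PySem.Set.contains (PySem.Set.ofList ((pvBIdx ls n).drop m)) q.1))).map (·.2)
    = pvGo ls m := by
  induction ls generalizing n m with
  | nil => simp [PySem.List.enumerate_nil, pvGo]
  | cons l ls ih =>
    have tail_ge : ∀ q ∈ PySem.List.enumerate ls (n + 1), n + 1 ≤ q.1 :=
      fun q hq => pvMem_enumerate_fst_ge ls (n + 1) q hq
    by_cases hb : pvBullet l
    · cases m with
      | zero =>
        rw [PySem.List.enumerate_cons, pvBIdx_cons, if_pos hb]
        simp only [List.drop_zero, List.filter_cons]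
        have hhd : (!(PySem.Set.contains (PySem.Set.ofList (n :: pvBIdx ls (n + 1))) n)) = false := by
          simp
        rw [hhd]
        simp only [Bool.false_eq_true, if_false]
        have hcongr : (PySem.List.enumerate ls (n + 1)).filter
            (fun q => !(PySem.Set.contains (PySem.Set.ofList (n :: pvBIdx ls (n + 1))) q.1))
          = (PySem.List.enumerate ls (n + 1)).filter
            (fun q => !(PySem.Set.contains (PySem.Set.ofList ((pvBIdx ls (n + 1)).drop 0)) q.1)) := by
          apply List.filter_congr
          intro q hq
          have hq1 := tail_ge q hq
          simp
          intro _
          omega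
        rw [hcongr, ih (n + 1) 0]
        simp [pvGo, hb]
      | succ k =>
        rw [PySem.List.enumerate_cons, pvBIdx_cons, if_pos hb]
        simp only [List.drop_succ_cons, List.filter_cons]
        have hhd : (!(PySem.Set.contains (PySem.Set.ofList ((pvBIdx ls (n + 1)).drop k)) n)) = true := by
          simp only [pvSet_contains_ofList, Bool.not_eq_true', List.contains_eq_mem]
          simp only [decide_eq_false_iff_not]
          intro hmem
          have hx := pvBIdx_ge ls (n + 1) n (List.mem_of_mem_drop hmem)
          omega
        rw [hhd]
        simp only [if_true]
        rw [List.map_cons, ih (n + 1) k]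
        simp [pvGo, hb]
    · rw [PySem.List.enumerate_cons, pvBIdx_cons, if_neg hb]
      simp only [List.filter_cons]
      have hhd : (!(PySem.Set.contains (PySem.Set.ofList ((pvBIdx ls (n + 1)).drop m)) n)) = true := by
        simp only [pvSet_contains_ofList, Bool.not_eq_true', List.contains_eq_mem]
        simp only [decide_eq_false_iff_not]
        intro hmem
        have hx := pvBIdx_ge ls (n + 1) n (List.mem_of_mem_drop hmem)
        omega
      rw [hhd]
      simp only [if_true]
      rw [List.map_cons, ih (n + 1) m]
      simp [pvGo, hb]

-- ===== VERDICT (by name: the statement is the Claim_ definition above) =====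
theorem trim_news_spec : Claim_equal_trim_news := by
  intro markdown_text limit _
  unfold Spec_trim_news trim_news trim_news_alt
  set lines := PySem.Str.splitlines (PySem.Str.strip markdown_text) with hlines
  have hA := pvA_fold limit lines [] 0
  simp only at hA ⊢
  rw [hA]
  have hslice : PySem.List.slice (pvBIdx lines 0) (some (max limit 0)) none
      = (pvBIdx lines 0).drop (max limit 0).toNat :=
    PySem.List.slice_from (pvBIdx lines 0) (by omega : (0:Int) ≤ max limit 0)
  have hB := pvB_filter lines 0 (max limit 0).toNat
  have hmax : (max limit 0).toNat = (limit - 0).toNat := by omega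
  rw [show ((PySem.List.enumerate lines 0).filter (fun q => pvBullet q.2)).map (·.1) = pvBIdx lines 0 from rfl,
      hslice, hB, hmax]
  simp
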